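-- pv_equiv track=rewrite | github.com/asanso/ca | exact_mca_fuzzer.py | best_agreement_exact
-- ===== SOURCE A (Python) =====
-- from itertools import combinations
-- from typing import List, Tuple, Optional
--
-- def poly_eval(coeffs: List[int], x: int, p: int) -> int:
--     y = 0
--     for c in reversed(coeffs):
--         y = (y * x + c) % p
--     return y
--
-- def eval_poly_vector(coeffs: List[int], xs: List[int], p: int) -> List[int]:
--     return [poly_eval(coeffs, x, p) for x in xs]
--
-- def poly_add(a, b, p):
--     m = max(len(a), len(b))
--     out = [0]*m
--     for i in range(m):
--         if i < len(a): out[i] = (out[i] + a[i]) % p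
--         if i < len(b): out[i] = (out[i] + b[i]) % p
--     return out
--
-- def poly_mul(a, b, p):
--     out = [0]*(len(a)+len(b)-1)
--     for i, ai in enumerate(a):
--         for j, bj in enumerate(b):
--             out[i+j] = (out[i+j] + ai*bj) % p
--     return out
--
-- def poly_scale(a, s, p):
--     return [(ai*s) % p for ai in a]
--
-- def interpolate_lagrange(xs, ys, k, p):
--     coeffs = [0]*k
--     for i in range(k):
--         xi, yi = xs[i] % p, ys[i] % p
--         num = [1]
--         denom = 1
--         for m in range(k):
--             if m == i: continue
--             num = poly_mul(num, [(-xs[m]) % p, 1], p)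
--             denom = (denom * ((xi - xs[m]) % p)) % p
--         inv_denom = pow(denom, p-2, p)
--         li = poly_scale(num, (yi*inv_denom) % p, p)
--         coeffs = poly_add(coeffs, li, p)
--     coeffs = (coeffs + [0]*k)[:k]
--     return coeffs
--
-- def best_agreement_exact(y: List[int], xs: List[int], k: int, p: int):
--     """
--     Return (max_agree, witness_S) where witness_S is a set of coordinates
--     on which y agrees with some RS codeword.
--     """
--     n = len(xs)
--     best = -1; best_S = None
--     for T in combinations(range(n), k):
--         xT = [xs[i] for i in T]; yT = [y[i] for i in T]
--         coeffs = interpolate_lagrange(xT, yT, k, p)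
--         cw = eval_poly_vector(coeffs, xs, p)
--         S = [i for i in range(n) if cw[i] == y[i]]
--         if len(S) > best:
--             best = len(S); best_S = S
--             if best == n: break
--     return best, best_S
-- ===== SOURCE B (Python) =====
-- from itertools import combinations
-- from typing import List
--
-- def best_agreement_exact(y: List[int], xs: List[int], k: int, p: int):
--     """
--     Return (max_agree, witness_S) where witness_S is a set of coordinates
--     on which y agrees with some RS codeword.
--
--     Direct barycentric-style Lagrange evaluation: no coefficient vector is
--     ever built (no poly_mul/poly_add/poly_scale/interpolate).
--     """
--     n = len(xs)
--     best = -1; best_S = None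
--     for T in combinations(range(n), k):
--         xT = [xs[i] for i in T]; yT = [y[i] for i in T]
--         # per-subset weights w_j = yT[j] * prod_{m!=j}(xT[j]-xT[m])^(p-2) mod p
--         w = []
--         for j in range(k):
--             denom = 1
--             for m in range(k):
--                 if m != j:
--                     denom = (denom * ((xT[j] - xT[m]) % p)) % p
--             w.append((yT[j] % p) * pow(denom, p - 2, p) % p)
--         S = []
--         for i in range(n):
--             x = xs[i]
--             if k == 0:
--                 cw_i = 0
--             else:
--                 acc = 0
--                 for j in range(k):
--                     t = w[j]
--                     for m in range(k):
--                         if m != j: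
--                             t = (t * ((x - xT[m]) % p)) % p
--                     acc = (acc + t) % p
--                 cw_i = acc
--             if cw_i == y[i]:
--                 S.append(i)
--         if len(S) > best:
--             best = len(S); best_S = S
--             if best == n: break
--     return best, best_S
-- ===== Notes on version B (the rewrite author's own statement) =====
-- stated objective: alternative
-- what changed: Per k-subset, B evaluates the Lagrange interpolant directly at every evaluation point (precomputed modular weights times a running product of (x - xT[m]) factors) instead of first materialising a coefficient vector via poly_mul/poly_add/poly_scale and then Horner-evaluating it; the outer combinations loop and tie-breaking are kept identical.
-- outside the precondition, e.g. on best_agreement_exact([1], [1], 1, -3): A returns (0, []), B returns (0, [])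
import Mathlib
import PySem

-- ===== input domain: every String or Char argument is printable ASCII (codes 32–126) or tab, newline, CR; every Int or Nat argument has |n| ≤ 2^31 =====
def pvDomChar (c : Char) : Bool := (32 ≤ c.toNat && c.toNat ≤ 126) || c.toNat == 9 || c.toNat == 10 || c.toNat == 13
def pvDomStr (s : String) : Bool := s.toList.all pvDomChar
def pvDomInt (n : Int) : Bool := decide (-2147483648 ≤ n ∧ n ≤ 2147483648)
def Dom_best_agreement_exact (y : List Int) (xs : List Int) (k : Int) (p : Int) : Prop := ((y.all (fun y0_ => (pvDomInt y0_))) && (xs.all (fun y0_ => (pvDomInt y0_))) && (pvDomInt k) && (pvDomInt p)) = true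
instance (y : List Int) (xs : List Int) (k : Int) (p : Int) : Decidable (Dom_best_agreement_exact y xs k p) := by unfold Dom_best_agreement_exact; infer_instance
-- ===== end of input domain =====

-- B replaces A's coefficient-vector Lagrange interpolation (poly_mul/poly_add/poly_scale + Horner)
-- by direct per-point evaluation with precomputed modular weights; same outer brute-force loop ("alternative").


-- ===== PORT A =====
def polyEval (coeffs : List Int) (x : Int) (p : Int) : Int :=
  coeffs.reverse.foldl (fun y c => PySem.Int.mod (y * x + c) p) 0

def evalPolyVector (coeffs : List Int) (xs : List Int) (p : Int) : List Int :=
  xs.map (fun x => polyEval coeffs x p)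

def polyAdd (a b : List Int) (p : Int) : List Int :=
  (List.range (max a.length b.length)).map (fun i =>
    let o : Int := 0
    let o := if i < a.length then PySem.Int.mod (o + a.getD i 0) p else o
    let o := if i < b.length then PySem.Int.mod (o + b.getD i 0) p else o
    o)

def polyMul (a b : List Int) (p : Int) : List Int :=
  a.zipIdx.foldl (fun out aii =>
    b.zipIdx.foldl (fun out bjj =>
      out.set (aii.2 + bjj.2) (PySem.Int.mod (out.getD (aii.2 + bjj.2) 0 + aii.1 * bjj.1) p)) out)
    (List.replicate (a.length + b.length - 1) 0)

def polyScale (a : List Int) (s p : Int) : List Int := a.map (fun ai => PySem.Int.mod (ai * s) p)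

-- pow(denom, p-2, p): for p ≥ 2 this is exactly powMod with exponent (p-2).toNat; for p = 1 Python's
-- modular-inverse pow(d, -1, 1) returns 0, which (1^anything) mod 1 = 0 also gives (exact on Pre_'s p ≥ 1).
def interpolateLagrange (xs ys : List Int) (k : Int) (p : Int) : List Int :=
  let coeffs :=
    (List.range k.toNat).foldl (fun coeffs i =>
      let xi := PySem.Int.mod (xs.getD i 0) p
      let yi := PySem.Int.mod (ys.getD i 0) p
      let nd := (List.range k.toNat).foldl (fun (nd : List Int × Int) m =>
        if m = i then nd
        else (polyMul nd.1 [PySem.Int.mod (-(xs.getD m 0)) p, 1] p,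
              PySem.Int.mod (nd.2 * PySem.Int.mod (xi - xs.getD m 0) p) p))
        ([1], 1)
      let invDenom := PySem.Int.powMod nd.2 (p - 2).toNat p
      let li := polyScale nd.1 (PySem.Int.mod (yi * invDenom) p) p
      polyAdd coeffs li p)
      (List.replicate k.toNat (0 : Int))
  (coeffs ++ List.replicate k.toNat 0).take k.toNat

-- itertools.combinations(range(n), r) in Python's lexicographic emission order
def combosL : List Nat → Nat → List (List Nat)
  | _, 0 => [[]]
  | [], _ + 1 => []
  | x :: xs, r + 1 => ((combosL xs r).map (fun t => x :: t)) ++ combosL xs (r + 1)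
termination_by l r => l.length

def bestLoopA (y xs : List Int) (k p : Int) : List (List Nat) → Int → Option (List Int) → Int × Option (List Int)
  | [], best, bestS => (best, bestS)
  | T :: rest, best, bestS =>
    let xT := T.map (fun i => xs.getD i 0)
    let yT := T.map (fun i => y.getD i 0)
    let coeffs := interpolateLagrange xT yT k p
    let cw := evalPolyVector coeffs xs p
    let S : List Int := (PySem.List.pyRange 0 (xs.length : Int) 1).filter
        (fun i => PySem.List.pyGetD cw i 0 == PySem.List.pyGetD y i 0)
    if (S.length : Int) > best then
      if (S.length : Int) = (xs.length : Int) then ((S.length : Int), some S)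
      else bestLoopA y xs k p rest (S.length : Int) (some S)
    else bestLoopA y xs k p rest best bestS

def best_agreement_exact (y : List Int) (xs : List Int) (k : Int) (p : Int) : Int × Option (List Int) :=
  bestLoopA y xs k p (combosL (List.range xs.length) k.toNat) (-1) none

-- ===== PORT B =====
def lagrangeWeights (xT yT : List Int) (k p : Int) : List Int :=
  (List.range k.toNat).map (fun j =>
    let denom := (List.range k.toNat).foldl (fun d m =>
      if m ≠ j then PySem.Int.mod (d * PySem.Int.mod (xT.getD j 0 - xT.getD m 0) p) p else d) 1
    PySem.Int.mod (PySem.Int.mod (yT.getD j 0) p * PySem.Int.powMod denom (p - 2).toNat p) p)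

def lagrangeEvalAt (xT w : List Int) (k p : Int) (x : Int) : Int :=
  if k = 0 then 0
  else (List.range k.toNat).foldl (fun acc j =>
    let t := (List.range k.toNat).foldl (fun t m =>
      if m ≠ j then PySem.Int.mod (t * PySem.Int.mod (x - xT.getD m 0) p) p else t) (w.getD j 0)
    PySem.Int.mod (acc + t) p) 0

def bestLoopB (y xs : List Int) (k p : Int) : List (List Nat) → Int → Option (List Int) → Int × Option (List Int)
  | [], best, bestS => (best, bestS)
  | T :: rest, best, bestS =>
    let xT := T.map (fun i => xs.getD i 0)
    let yT := T.map (fun i => y.getD i 0)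
    let w := lagrangeWeights xT yT k p
    let S : List Int := (PySem.List.pyRange 0 (xs.length : Int) 1).filter
        (fun i => lagrangeEvalAt xT w k p (PySem.List.pyGetD xs i 0) == PySem.List.pyGetD y i 0)
    if (S.length : Int) > best then
      if (S.length : Int) = (xs.length : Int) then ((S.length : Int), some S)
      else bestLoopB y xs k p rest (S.length : Int) (some S)
    else bestLoopB y xs k p rest best bestS

def best_agreement_exact_alt (y : List Int) (xs : List Int) (k : Int) (p : Int) : Int × Option (List Int) :=
  bestLoopB y xs k p (combosL (List.range xs.length) k.toNat) (-1) none

-- ===== PRECONDITION & SPEC =====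
-- Pre_ excludes exactly the inputs where A raises: k < 0 (ValueError from combinations), p = 0
-- (ZeroDivisionError), len(y) < len(xs) with k ≤ len(xs) (IndexError), and p < 0, where Python's
-- pow with a negative modulus/exponent raises ValueError whenever some subset denominator is not
-- invertible (A returns only on accidental invertibility corners there, e.g. ([1],[1],1,-3)).
def Pre_best_agreement_exact (y : List Int) (xs : List Int) (k : Int) (p : Int) : Prop :=
  0 ≤ k ∧ 1 ≤ p ∧ (k ≤ (xs.length : Int) → xs.length ≤ y.length)
instance (y : List Int) (xs : List Int) (k : Int) (p : Int) : Decidable (Pre_best_agreement_exact y xs k p) := by unfold Pre_best_agreement_exact; infer_instance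

def pvWitness_best_agreement_exact : List Int × List Int × Int × Int := ([1, 2], [0, 1], 1, 5)

def Spec_best_agreement_exact (y : List Int) (xs : List Int) (k : Int) (p : Int) (out : Int × Option (List Int)) : Prop := out = best_agreement_exact_alt y xs k p
instance (y : List Int) (xs : List Int) (k : Int) (p : Int) (out : Int × Option (List Int)) : Decidable (Spec_best_agreement_exact y xs k p out) := by unfold Spec_best_agreement_exact; infer_instance

-- ===== CLAIM (what is proved, stated in full; the proofs are below) =====
def Claim_equal_best_agreement_exact : Prop := ∀ (y : List Int) (xs : List Int) (k : Int) (p : Int), Dom_best_agreement_exact y xs k p → Pre_best_agreement_exact y xs k p → Spec_best_agreement_exact y xs k p (best_agreement_exact y xs k p)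

-- ===== LEMMAS AND PROOFS =====

def evalH (N : Nat) (l : List Int) (x : ZMod N) : ZMod N :=
  l.foldr (fun c acc => acc * x + (c : ZMod N)) 0

theorem evalH_nil (N : Nat) (x : ZMod N) : evalH N [] x = 0 := rfl

theorem evalH_cons (N : Nat) (c : Int) (l : List Int) (x : ZMod N) :
    evalH N (c :: l) x = evalH N l x * x + (c : ZMod N) := rfl

theorem castmod (p : Int) (hp : 0 < p) (a : Int) :
    ((PySem.Int.mod a p : Int) : ZMod p.toNat) = (a : ZMod p.toNat) := by
  obtain ⟨n, rfl⟩ := Int.eq_ofNat_of_zero_le hp.le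
  rw [PySem.Int.mod_eq_emod_of_pos hp]
  simp only [Int.toNat_natCast]
  exact ZMod.intCast_mod a n

theorem eq_of_cast_eq (p : Int) (hp : 0 < p) {a b : Int} (ha0 : 0 ≤ a) (hap : a < p)
    (hb0 : 0 ≤ b) (hbp : b < p)
    (h : (a : ZMod p.toNat) = (b : ZMod p.toNat)) : a = b := by
  obtain ⟨n, rfl⟩ := Int.eq_ofNat_of_zero_le hp.le
  have hmod := (ZMod.intCast_eq_intCast_iff a b ((n : Int)).toNat).1 h
  simp only [Int.toNat_natCast] at hmod
  unfold Int.ModEq at hmod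
  rwa [Int.emod_eq_of_lt ha0 hap, Int.emod_eq_of_lt hb0 hbp] at hmod

theorem polyEval_foldr (c : List Int) (x p : Int) :
    polyEval c x p = c.foldr (fun ci yy => PySem.Int.mod (yy * x + ci) p) 0 := by
  simp [polyEval, List.foldl_reverse]

theorem cast_polyEval (p : Int) (hp : 0 < p) (x : Int) (c : List Int) :
    ((polyEval c x p : Int) : ZMod p.toNat) = evalH p.toNat c (x : ZMod p.toNat) := by
  induction c with
  | nil => simp [polyEval, evalH]
  | cons c0 cs ih =>
    have h1 : polyEval (c0 :: cs) x p = PySem.Int.mod ((polyEval cs x p) * x + c0) p := by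
      simp [polyEval_foldr]
    rw [h1, castmod p hp]
    push_cast
    rw [ih, evalH_cons]

theorem polyEval_bounds (p : Int) (hp : 0 < p) (x : Int) (c0 : Int) (cs : List Int) :
    0 ≤ polyEval (c0 :: cs) x p ∧ polyEval (c0 :: cs) x p < p := by
  have h1 : polyEval (c0 :: cs) x p = PySem.Int.mod ((polyEval cs x p) * x + c0) p := by
    simp [polyEval_foldr]
  rw [h1]
  exact ⟨PySem.Int.mod_nonneg _ hp, PySem.Int.mod_lt _ hp⟩

theorem evalH_replicate_zero (N : Nat) (K : Nat) (x : ZMod N) :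
    evalH N (List.replicate K 0) x = 0 := by
  induction K with
  | zero => rfl
  | succ n ih => rw [List.replicate_succ, evalH_cons, ih]; simp

theorem evalH_set_mod (p : Int) (hp : 0 < p) (x : ZMod p.toNat) :
    ∀ (out : List Int) (t : Nat), t < out.length → ∀ δ : Int,
      evalH p.toNat (out.set t (PySem.Int.mod (out.getD t 0 + δ) p)) x
        = evalH p.toNat out x + (δ : ZMod p.toNat) * x ^ t
  | [], t, ht, δ => by simp at ht
  | o0 :: os, 0, ht, δ => by
    simp only [List.set_cons_zero, List.getD_cons_zero, evalH_cons, castmod p hp]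
    push_cast; ring
  | o0 :: os, t + 1, ht, δ => by
    simp only [List.set_cons_succ, List.getD_cons_succ, evalH_cons]
    rw [evalH_set_mod p hp x os t (by simpa using ht) δ]
    ring

theorem polyMul_lin_def (a : List Int) (c p : Int) :
    polyMul a [c, 1] p = (a.zipIdx).foldl (fun out aii =>
        (out.set aii.2 (PySem.Int.mod (out.getD aii.2 0 + aii.1 * c) p)).set (aii.2 + 1)
          (PySem.Int.mod ((out.set aii.2 (PySem.Int.mod (out.getD aii.2 0 + aii.1 * c) p)).getD (aii.2 + 1) 0 + aii.1 * 1) p))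
      (List.replicate (a.length + 1) 0) := by
  simp [polyMul, List.zipIdx, List.foldl]

theorem mulFold_aux (p : Int) (hp : 0 < p) (c : Int) (x : ZMod p.toNat) :
    ∀ (a : List Int) (i0 : Nat) (out : List Int), i0 + a.length + 1 ≤ out.length →
      (((a.zipIdx i0).foldl (fun out aii =>
        (out.set aii.2 (PySem.Int.mod (out.getD aii.2 0 + aii.1 * c) p)).set (aii.2 + 1)
          (PySem.Int.mod ((out.set aii.2 (PySem.Int.mod (out.getD aii.2 0 + aii.1 * c) p)).getD (aii.2 + 1) 0 + aii.1 * 1) p))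
        out).length = out.length ∧
      evalH p.toNat ((a.zipIdx i0).foldl (fun out aii =>
        (out.set aii.2 (PySem.Int.mod (out.getD aii.2 0 + aii.1 * c) p)).set (aii.2 + 1)
          (PySem.Int.mod ((out.set aii.2 (PySem.Int.mod (out.getD aii.2 0 + aii.1 * c) p)).getD (aii.2 + 1) 0 + aii.1 * 1) p))
        out) x
        = evalH p.toNat out x + evalH p.toNat a x * ((c : ZMod p.toNat) + x) * x ^ i0)
  | [], i0, out, h => by simp [evalH_nil]
  | a0 :: as, i0, out, h => by
    rw [List.zipIdx_cons, List.foldl_cons]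
    simp only [List.length_cons] at h
    have hlen : i0 < out.length := by omega
    set o1 := out.set i0 (PySem.Int.mod (out.getD i0 0 + a0 * c) p) with ho1
    have hl1 : o1.length = out.length := List.length_set
    have hlen2 : i0 + 1 < o1.length := by omega
    set o2 := o1.set (i0 + 1) (PySem.Int.mod (o1.getD (i0 + 1) 0 + a0 * 1) p) with ho2
    have hl2 : o2.length = out.length := by rw [ho2, List.length_set, hl1]
    have hrec := mulFold_aux p hp c x as (i0 + 1) o2 (by omega)
    refine ⟨by rw [hrec.1, hl2], ?_⟩
    rw [hrec.2]
    have e2 : evalH p.toNat o2 x = evalH p.toNat o1 x + ((a0 * 1 : Int) : ZMod p.toNat) * x ^ (i0 + 1) :=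
      evalH_set_mod p hp x o1 (i0 + 1) hlen2 (a0 * 1)
    have e1 : evalH p.toNat o1 x = evalH p.toNat out x + ((a0 * c : Int) : ZMod p.toNat) * x ^ i0 :=
      evalH_set_mod p hp x out i0 hlen (a0 * c)
    rw [e2, e1, evalH_cons]
    push_cast
    ring

theorem polyMul_lin (p : Int) (hp : 0 < p) (c : Int) (x : ZMod p.toNat) (a : List Int) :
    (polyMul a [c, 1] p).length = a.length + 1 ∧
    evalH p.toNat (polyMul a [c, 1] p) x = evalH p.toNat a x * ((c : ZMod p.toNat) + x) := by
  rw [polyMul_lin_def]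
  have h := mulFold_aux p hp c x a 0 (List.replicate (a.length + 1) 0) (by simp)
  refine ⟨by rw [h.1]; simp, ?_⟩
  rw [h.2, evalH_replicate_zero]
  simp

def zpAdd (p : Int) : List Int → List Int → List Int
  | [], [] => []
  | a0 :: as, [] => PySem.Int.mod (0 + a0) p :: zpAdd p as []
  | [], b0 :: bs => PySem.Int.mod (0 + b0) p :: zpAdd p [] bs
  | a0 :: as, b0 :: bs =>
      PySem.Int.mod (PySem.Int.mod (0 + a0) p + b0) p :: zpAdd p as bs

theorem polyAdd_nil_left (p : Int) : ∀ b : List Int, polyAdd [] b p = zpAdd p [] b := by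
  intro b
  induction b with
  | nil => simp [polyAdd, zpAdd]
  | cons b0 bs ih =>
    rw [zpAdd, ← ih]
    simp only [polyAdd, List.length_nil, List.length_cons, Nat.max_eq_right (Nat.zero_le _),
      List.range_succ_eq_map, List.map_cons, List.map_map]
    congr 1
    apply List.map_congr_left
    intro i _
    simp [Function.comp]

theorem polyAdd_eq_zpAdd (p : Int) : ∀ (a b : List Int), polyAdd a b p = zpAdd p a b
  | [], b => polyAdd_nil_left p b
  | a0 :: as, [] => by
    rw [zpAdd, ← polyAdd_eq_zpAdd p as []]
    simp only [polyAdd, List.length_cons, List.length_nil, Nat.max_zero,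
      List.range_succ_eq_map, List.map_cons, List.map_map]
    congr 1
    apply List.map_congr_left
    intro i _
    simp [Function.comp]
  | a0 :: as, b0 :: bs => by
    rw [zpAdd, ← polyAdd_eq_zpAdd p as bs]
    simp only [polyAdd, List.length_cons, Nat.succ_max_succ,
      List.range_succ_eq_map, List.map_cons, List.map_map]
    congr 1
    apply List.map_congr_left
    intro i _
    simp [Function.comp]

theorem evalH_zpAdd_nil (p : Int) (hp : 0 < p) (x : ZMod p.toNat) :
    ∀ b : List Int, evalH p.toNat (zpAdd p [] b) x = evalH p.toNat b x
  | [] => by simp [zpAdd]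
  | b0 :: bs => by
    rw [zpAdd, evalH_cons, evalH_cons, evalH_zpAdd_nil p hp x bs]
    simp [castmod p hp]

theorem evalH_zpAdd (p : Int) (hp : 0 < p) (x : ZMod p.toNat) :
    ∀ (a b : List Int), evalH p.toNat (zpAdd p a b) x = evalH p.toNat a x + evalH p.toNat b x
  | [], b => by rw [evalH_zpAdd_nil p hp x b, evalH_nil]; ring
  | a0 :: as, [] => by
    rw [zpAdd, evalH_cons, evalH_cons, evalH_zpAdd p hp x as [], evalH_nil]
    simp [castmod p hp]
  | a0 :: as, b0 :: bs => by
    rw [zpAdd, evalH_cons, evalH_cons, evalH_cons, evalH_zpAdd p hp x as bs]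
    simp [castmod p hp]
    push_cast
    ring

theorem evalH_polyAdd (p : Int) (hp : 0 < p) (x : ZMod p.toNat) (a b : List Int) :
    evalH p.toNat (polyAdd a b p) x = evalH p.toNat a x + evalH p.toNat b x := by
  rw [polyAdd_eq_zpAdd, evalH_zpAdd p hp]

theorem length_polyAdd (a b : List Int) (p : Int) :
    (polyAdd a b p).length = max a.length b.length := by
  simp [polyAdd]

theorem evalH_polyScale (p : Int) (hp : 0 < p) (x : ZMod p.toNat) (s : Int) :
    ∀ a : List Int, evalH p.toNat (polyScale a s p) x = evalH p.toNat a x * (s : ZMod p.toNat)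
  | [] => by simp [polyScale, evalH_nil]
  | a0 :: as => by
    simp only [polyScale, List.map_cons, evalH_cons]
    rw [show (List.map (fun ai => PySem.Int.mod (ai * s) p) as) = polyScale as s p from rfl,
      evalH_polyScale p hp x s as]
    simp [castmod p hp]
    push_cast
    ring

theorem length_polyScale (a : List Int) (s p : Int) : (polyScale a s p).length = a.length := by
  simp [polyScale]

theorem modsub (p : Int) (hp : 0 < p) (a b : Int) :
    PySem.Int.mod (PySem.Int.mod a p - b) p = PySem.Int.mod (a - b) p := by
  simp only [PySem.Int.mod_eq_emod_of_pos hp]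
  exact Int.emod_sub_emod a p b

theorem length_filter_ne (K i : Nat) (h : i < K) :
    ((List.range K).filter (fun m => m ≠ i)).length = K - 1 := by
  have h2 : ((List.range K).filter (fun m => m == i)).length = 1 := by
    rw [← List.count_eq_length_filter, List.count_range, if_pos h]
  have h1 : ((List.range K).filter (fun m => m == i)).length
      + ((List.range K).filter (fun m => !(m == i))).length = K := by
    simpa using (List.length_eq_length_filter_add (l := List.range K) (fun m => m == i)).symm
  have h3 : (List.range K).filter (fun m => m ≠ i) = (List.range K).filter (fun m => !(m == i)) := by
    apply List.filter_congr; intro m _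
    simp [← Bool.beq_eq_decide_eq]
  rw [h3]
  omega

-- proof-layer names for the folds inside the two ports
def denomFold (p xi : Int) (xT : List Int) (i : Nat) (L : List Nat) (d : Int) : Int :=
  L.foldl (fun dd m => if m = i then dd
    else PySem.Int.mod (dd * PySem.Int.mod (xi - xT.getD m 0) p) p) d

def sFac (p : Int) (xT yT : List Int) (K : Nat) (i : Nat) : Int :=
  PySem.Int.mod (PySem.Int.mod (yT.getD i 0) p *
    PySem.Int.powMod (denomFold p (PySem.Int.mod (xT.getD i 0) p) xT i (List.range K) 1) (p - 2).toNat p) p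

def prodP (p : Int) (xT : List Int) (i : Nat) (x : ZMod p.toNat) (L : List Nat) : ZMod p.toNat :=
  ((L.filter (fun m => m ≠ i)).map (fun m => x - ((xT.getD m 0 : Int) : ZMod p.toNat))).prod

def AinnerStep (p xi : Int) (xT : List Int) (i : Nat) : (List Int × Int) → Nat → (List Int × Int) :=
  fun nd m => if m = i then nd
    else (polyMul nd.1 [PySem.Int.mod (-(xT.getD m 0)) p, 1] p,
          PySem.Int.mod (nd.2 * PySem.Int.mod (xi - xT.getD m 0) p) p)

def AStep (p : Int) (xT yT : List Int) (K : Nat) (coeffs : List Int) (i : Nat) : List Int :=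
  let xi := PySem.Int.mod (xT.getD i 0) p
  let yi := PySem.Int.mod (yT.getD i 0) p
  let nd := (List.range K).foldl (AinnerStep p xi xT i) ([1], 1)
  let invDenom := PySem.Int.powMod nd.2 (p - 2).toNat p
  let li := polyScale nd.1 (PySem.Int.mod (yi * invDenom) p) p
  polyAdd coeffs li p

theorem interp_def (xT yT : List Int) (k p : Int) :
    interpolateLagrange xT yT k p
      = ((List.range k.toNat).foldl (AStep p xT yT k.toNat) (List.replicate k.toNat 0)
          ++ List.replicate k.toNat 0).take k.toNat := rfl

theorem prodP_filter_cons_pos (p : Int) (xT : List Int) (i m : Nat) (x : ZMod p.toNat)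
    (L : List Nat) (hm : m ≠ i) :
    prodP p xT i x (m :: L) = (x - ((xT.getD m 0 : Int) : ZMod p.toNat)) * prodP p xT i x L := by
  simp [prodP, hm]

theorem prodP_filter_cons_neg (p : Int) (xT : List Int) (i : Nat) (x : ZMod p.toNat)
    (L : List Nat) :
    prodP p xT i x (i :: L) = prodP p xT i x L := by
  simp [prodP]

theorem numFold (p : Int) (hp : 0 < p) (xi : Int) (xT : List Int) (i : Nat) (x : ZMod p.toNat) :
    ∀ (L : List Nat) (nm : List Int) (d : Int), nm ≠ [] →
      (L.foldl (AinnerStep p xi xT i) (nm, d)).1 ≠ [] ∧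
      (L.foldl (AinnerStep p xi xT i) (nm, d)).1.length
        = nm.length + (L.filter (fun m => m ≠ i)).length ∧
      evalH p.toNat (L.foldl (AinnerStep p xi xT i) (nm, d)).1 x
        = evalH p.toNat nm x * prodP p xT i x L ∧
      (L.foldl (AinnerStep p xi xT i) (nm, d)).2 = denomFold p xi xT i L d
  | [], nm, d, hnm => by
    refine ⟨hnm, by simp, ?_, rfl⟩
    simp [prodP]
  | m :: L, nm, d, hnm => by
    by_cases hm : m = i
    · subst hm
      have step : AinnerStep p xi xT m (nm, d) m = (nm, d) := by simp [AinnerStep]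
      rw [List.foldl_cons, step, prodP_filter_cons_neg]
      have ih := numFold p hp xi xT m x L nm d hnm
      refine ⟨ih.1, ?_, ih.2.2.1, ?_⟩
      · rw [ih.2.1]; simp
      · rw [ih.2.2.2]; simp [denomFold, List.foldl_cons]
    · have hml := polyMul_lin p hp (PySem.Int.mod (-(xT.getD m 0)) p) x nm
      have step : AinnerStep p xi xT i (nm, d) m
          = (polyMul nm [PySem.Int.mod (-(xT.getD m 0)) p, 1] p,
             PySem.Int.mod (d * PySem.Int.mod (xi - xT.getD m 0) p) p) := by
        simp [AinnerStep, hm]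
      rw [List.foldl_cons, step]
      have hne : polyMul nm [PySem.Int.mod (-(xT.getD m 0)) p, 1] p ≠ [] := by
        have := hml.1
        intro hc; rw [hc] at this; simp at this
      have ih := numFold p hp xi xT i x L
        (polyMul nm [PySem.Int.mod (-(xT.getD m 0)) p, 1] p)
        (PySem.Int.mod (d * PySem.Int.mod (xi - xT.getD m 0) p) p) hne
      refine ⟨ih.1, ?_, ?_, ?_⟩
      · rw [ih.2.1, hml.1]
        rw [List.filter_cons_of_pos (by simpa using hm)]
        simp; omega
      · rw [ih.2.2.1, hml.2, prodP_filter_cons_pos p xT i m x L hm, castmod p hp]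
        push_cast
        ring
      · rw [ih.2.2.2]
        simp [denomFold, List.foldl_cons, hm]

theorem denomFold_eq_B (p : Int) (hp : 0 < p) (xT : List Int) (j : Nat) :
    ∀ (L : List Nat) (d : Int),
      L.foldl (fun dd m => if m ≠ j
          then PySem.Int.mod (dd * PySem.Int.mod (xT.getD j 0 - xT.getD m 0) p) p else dd) d
        = denomFold p (PySem.Int.mod (xT.getD j 0) p) xT j L d
  | [], d => rfl
  | m :: L, d => by
    rw [List.foldl_cons, denomFold, List.foldl_cons]
    by_cases hm : m = j
    · simp only [hm, ne_eq, not_true_eq_false, if_false]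
      exact denomFold_eq_B p hp xT j L d
    · simp only [ne_eq, hm, not_false_eq_true, if_true]
      rw [modsub p hp]
      exact denomFold_eq_B p hp xT j L _

theorem cast_mulFold (p : Int) (hp : 0 < p) (g : Nat → Int) (i : Nat) :
    ∀ (L : List Nat) (t0 : Int),
      ((L.foldl (fun t m => if m ≠ i then PySem.Int.mod (t * PySem.Int.mod (g m) p) p else t) t0
          : Int) : ZMod p.toNat)
        = (t0 : ZMod p.toNat)
            * ((L.filter (fun m => m ≠ i)).map (fun m => ((g m : Int) : ZMod p.toNat))).prod
  | [], t0 => by simp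
  | m :: L, t0 => by
    rw [List.foldl_cons]
    by_cases hm : m = i
    · simp only [hm, ne_eq, not_true_eq_false, if_false]
      rw [cast_mulFold p hp g i L t0]
      simp
    · simp only [ne_eq, hm, not_false_eq_true, if_true]
      rw [cast_mulFold p hp g i L _, castmod p hp]
      push_cast
      rw [castmod p hp, List.filter_cons_of_pos (by simpa using hm)]
      simp
      ring

theorem cast_sumFold (p : Int) (hp : 0 < p) (F : Nat → Int) :
    ∀ (L : List Nat) (a0 : Int),
      ((L.foldl (fun acc j => PySem.Int.mod (acc + F j) p) a0 : Int) : ZMod p.toNat)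
        = (a0 : ZMod p.toNat) + (L.map (fun j => ((F j : Int) : ZMod p.toNat))).sum
  | [], a0 => by simp
  | j0 :: L, a0 => by
    rw [List.foldl_cons, cast_sumFold p hp F L _, castmod p hp]
    push_cast
    simp
    ring

theorem sumFold_bounds (p : Int) (hp : 0 < p) (F : Nat → Int) (K : Nat) (hK : 0 < K) (a0 : Int) :
    0 ≤ (List.range K).foldl (fun acc j => PySem.Int.mod (acc + F j) p) a0 ∧
    (List.range K).foldl (fun acc j => PySem.Int.mod (acc + F j) p) a0 < p := by
  obtain ⟨K', rfl⟩ : ∃ K', K = K' + 1 := ⟨K - 1, by omega⟩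
  rw [List.range_succ, List.foldl_append, List.foldl_cons, List.foldl_nil]
  exact ⟨PySem.Int.mod_nonneg _ hp, PySem.Int.mod_lt _ hp⟩

theorem coeffsFold (p : Int) (hp : 0 < p) (xT yT : List Int) (K : Nat) (x : Int) :
    ∀ (L : List Nat) (coeffs : List Int), (∀ m ∈ L, m < K) → coeffs.length = K →
      (L.foldl (AStep p xT yT K) coeffs).length = K ∧
      evalH p.toNat (L.foldl (AStep p xT yT K) coeffs) (x : ZMod p.toNat)
        = evalH p.toNat coeffs (x : ZMod p.toNat)
          + (L.map (fun i => (sFac p xT yT K i : ZMod p.toNat)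
              * prodP p xT i (x : ZMod p.toNat) (List.range K))).sum
  | [], coeffs, _, hlen => ⟨hlen, by simp⟩
  | i :: L, coeffs, hmem, hlen => by
    have hi : i < K := hmem i (by simp)
    have hnum := numFold p hp (PySem.Int.mod (xT.getD i 0) p) xT i (x : ZMod p.toNat)
      (List.range K) [1] 1 (by simp)
    have hflen : ((List.range K).filter (fun m => m ≠ i)).length = K - 1 :=
      length_filter_ne K i hi
    set nd := (List.range K).foldl
      (AinnerStep p (PySem.Int.mod (xT.getD i 0) p) xT i) (([1] : List Int), (1 : Int)) with hnd
    have hlen1 : nd.1.length = K := by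
      rw [hnum.2.1, hflen]; simp; omega
    have heval1 : evalH p.toNat nd.1 (x : ZMod p.toNat)
        = prodP p xT i (x : ZMod p.toNat) (List.range K) := by
      rw [hnum.2.2.1]
      simp [evalH]
    have hstep : AStep p xT yT K coeffs i
        = polyAdd coeffs (polyScale nd.1 (sFac p xT yT K i) p) p := by
      rw [AStep, sFac, ← hnum.2.2.2]
    have hlen2 : (AStep p xT yT K coeffs i).length = K := by
      rw [hstep, length_polyAdd, length_polyScale, hlen, hlen1]
      simp
    have ih := coeffsFold p hp xT yT K x L (AStep p xT yT K coeffs i)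
      (fun m hm => hmem m (by simp [hm])) hlen2
    rw [List.foldl_cons]
    refine ⟨ih.1, ?_⟩
    rw [ih.2, hstep, evalH_polyAdd p hp, evalH_polyScale p hp, heval1]
    rw [List.map_cons, List.sum_cons]
    ring

theorem eval_eq (xT yT : List Int) (k p : Int) (hp : 0 < p) (x : Int) :
    polyEval (interpolateLagrange xT yT k p) x p
      = lagrangeEvalAt xT (lagrangeWeights xT yT k p) k p x := by
  by_cases hK : k.toNat = 0
  · have hL : interpolateLagrange xT yT k p = [] := by
      rw [interp_def, hK]; simp
    have h1 : polyEval [] x p = 0 := by simp [polyEval_foldr]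
    rw [hL, h1]
    simp only [lagrangeEvalAt, hK]
    by_cases hk0 : k = 0
    · rw [if_pos hk0]
    · rw [if_neg hk0]; rfl
  · have hkne : k ≠ 0 := by omega
    have hKpos : 0 < k.toNat := Nat.pos_of_ne_zero hK
    have hcf := coeffsFold p hp xT yT k.toNat x (List.range k.toNat)
      (List.replicate k.toNat 0) (fun m hm => List.mem_range.1 hm) (by simp)
    have hInt : interpolateLagrange xT yT k p
        = (List.range k.toNat).foldl (AStep p xT yT k.toNat) (List.replicate k.toNat 0) := by
      rw [interp_def]
      exact List.take_left' hcf.1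
    have hw : ∀ j, j < k.toNat →
        (lagrangeWeights xT yT k p).getD j 0 = sFac p xT yT k.toNat j := by
      intro j hj
      show (List.map _ (List.range k.toNat)).getD j 0 = _
      rw [PySem.List.getD_map_range _ k.toNat j 0 hj]
      simp only [denomFold_eq_B p hp xT j]
      rfl
    simp only [lagrangeEvalAt, if_neg hkne]
    set F : Nat → Int := fun j => (List.range k.toNat).foldl
      (fun t m => if m ≠ j
        then PySem.Int.mod (t * PySem.Int.mod (x - xT.getD m 0) p) p else t)
      ((lagrangeWeights xT yT k p).getD j 0) with hF
    show polyEval (interpolateLagrange xT yT k p) x p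
      = (List.range k.toNat).foldl (fun acc j => PySem.Int.mod (acc + F j) p) 0
    obtain ⟨c0, cs, hcc⟩ : ∃ c0 cs, interpolateLagrange xT yT k p = c0 :: cs := by
      cases hcv : interpolateLagrange xT yT k p with
      | nil =>
        rw [hInt] at hcv
        have := hcf.1
        rw [hcv] at this
        simp at this
        omega
      | cons c0 cs => exact ⟨c0, cs, rfl⟩
    have bA : 0 ≤ polyEval (interpolateLagrange xT yT k p) x p ∧
        polyEval (interpolateLagrange xT yT k p) x p < p := by
      rw [hcc]; exact polyEval_bounds p hp x c0 cs
    have bB := sumFold_bounds p hp F k.toNat hKpos 0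
    apply eq_of_cast_eq p hp bA.1 bA.2 bB.1 bB.2
    rw [cast_polyEval p hp x, hInt, hcf.2, evalH_replicate_zero, cast_sumFold p hp F]
    push_cast [zero_add]
    apply congrArg List.sum
    apply List.map_congr_left
    intro j hj
    have hjK : j < k.toNat := List.mem_range.1 hj
    have hmf := cast_mulFold p hp (fun m => x - xT.getD m 0) j (List.range k.toNat)
      ((lagrangeWeights xT yT k p).getD j 0)
    rw [hF]
    rw [hmf, hw j hjK]
    congr 1
    rw [prodP]
    apply congrArg List.prod
    apply List.map_congr_left
    intro m _
    push_cast
    ring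

theorem loop_eq (y xs : List Int) (k p : Int) (hp : 0 < p) :
    ∀ (L : List (List Nat)) (best : Int) (bestS : Option (List Int)),
      bestLoopA y xs k p L best bestS = bestLoopB y xs k p L best bestS
  | [], best, bestS => rfl
  | T :: rest, best, bestS => by
    rw [bestLoopA, bestLoopB]
    have hS : (PySem.List.pyRange 0 (xs.length : Int) 1).filter
          (fun i => PySem.List.pyGetD
            (evalPolyVector (interpolateLagrange (T.map (fun i => xs.getD i 0))
              (T.map (fun i => y.getD i 0)) k p) xs p) i 0 == PySem.List.pyGetD y i 0)
        = (PySem.List.pyRange 0 (xs.length : Int) 1).filter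
          (fun i => lagrangeEvalAt (T.map (fun i => xs.getD i 0))
            (lagrangeWeights (T.map (fun i => xs.getD i 0)) (T.map (fun i => y.getD i 0)) k p)
            k p (PySem.List.pyGetD xs i 0) == PySem.List.pyGetD y i 0) := by
      apply List.filter_congr
      intro i hi
      have hmem := PySem.List.mem_pyRange_one.1 hi
      have h0 : 0 ≤ i := hmem.1
      have h1 : i < (xs.length : Int) := hmem.2
      have hcw : PySem.List.pyGetD
          (evalPolyVector (interpolateLagrange (T.map (fun i => xs.getD i 0))
            (T.map (fun i => y.getD i 0)) k p) xs p) i 0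
          = polyEval (interpolateLagrange (T.map (fun i => xs.getD i 0))
            (T.map (fun i => y.getD i 0)) k p) (xs[i.toNat]'(by omega)) p := by
        rw [evalPolyVector]
        rw [PySem.List.pyGetD_eq_getElem _ _ h0 (by simpa using h1)]
        simp
      have hx : PySem.List.pyGetD xs i 0 = xs[i.toNat]'(by omega) :=
        PySem.List.pyGetD_eq_getElem _ _ h0 h1
      rw [hcw, hx, eval_eq _ _ k p hp]
    rw [hS]
    have hrec1 := loop_eq y xs k p hp rest
    split
    · split
      · rfl
      · exact hrec1 _ _
    · exact hrec1 _ _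

-- ===== VERDICT (by name: the statement is the Claim_ definition above) =====
theorem best_agreement_exact_spec : Claim_equal_best_agreement_exact := by
  intro y xs k p _hDom hPre
  obtain ⟨hk, hp, hy⟩ := hPre
  unfold Spec_best_agreement_exact best_agreement_exact best_agreement_exact_alt
  exact loop_eq y xs k p (by omega) _ _ _
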